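-- pv_equiv track=rewrite | github.com/ofersabo/DA | preprocessing_prepeare_sentence.py | find_closest_distance_between_entities
-- ===== SOURCE A (Python) =====
-- def find_closest_distance_between_entities(head_start_location, head_end_location, tail_start_location,
--                                            tail_end_location):
--     min_distance = 99999
--     for i, x in enumerate(head_start_location):
--         for j, y in enumerate(tail_start_location):
--             if abs(x - y) < min_distance:
--                 min_distance = abs(x - y)
--                 h_start, h_end, t_start, t_end = x, head_end_location[i], y, tail_end_location[j]
--
--     return h_start, h_end, t_start, t_end
-- ===== SOURCE B (Python) =====
-- def find_closest_distance_between_entities(head_start_location, head_end_location, tail_start_location,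
--                                            tail_end_location):
--     # two-phase: compute the global minimum distance, then locate the first pair achieving it
--     best = min(abs(x - y) for x in head_start_location for y in tail_start_location)
--     i, x = next((i, x) for i, x in enumerate(head_start_location)
--                 if any(abs(x - y) == best for y in tail_start_location))
--     j, y = next((j, y) for j, y in enumerate(tail_start_location) if abs(x - y) == best)
--     return x, head_end_location[i], y, tail_end_location[j]
-- ===== Notes on version B (the rewrite author's own statement) =====
-- stated objective: alternative
-- what changed: A tracks the best-so-far pair in one nested scan with four rolling variables; B is a two-phase search: it first computes the global minimum distance with min() over all pairs and then directly locates the first head index and first tail index achieving it.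
-- outside the precondition, e.g. on find_closest_distance_between_entities([0, 5], [9], [0], [3]): A returns (0, 9, 0, 3), B returns (0, 9, 0, 3)
import Mathlib
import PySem

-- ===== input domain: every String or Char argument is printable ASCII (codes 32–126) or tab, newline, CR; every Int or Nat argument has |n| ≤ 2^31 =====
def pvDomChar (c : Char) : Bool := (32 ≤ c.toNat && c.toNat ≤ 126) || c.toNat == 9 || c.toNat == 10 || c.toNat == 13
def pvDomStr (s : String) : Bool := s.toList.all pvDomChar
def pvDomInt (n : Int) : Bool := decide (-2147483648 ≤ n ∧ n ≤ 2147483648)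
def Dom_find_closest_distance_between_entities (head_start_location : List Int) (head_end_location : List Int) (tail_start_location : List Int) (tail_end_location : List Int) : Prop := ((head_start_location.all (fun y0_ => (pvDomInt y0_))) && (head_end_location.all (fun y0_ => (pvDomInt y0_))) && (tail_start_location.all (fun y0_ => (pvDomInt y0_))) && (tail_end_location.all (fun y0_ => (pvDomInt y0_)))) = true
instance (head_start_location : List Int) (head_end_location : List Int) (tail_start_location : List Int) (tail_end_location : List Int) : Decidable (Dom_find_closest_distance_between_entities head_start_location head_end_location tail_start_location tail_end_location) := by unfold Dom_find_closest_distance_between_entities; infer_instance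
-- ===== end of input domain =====

-- B replaces A's single-pass best-so-far scan by a two-phase search (global min distance first,
-- then the first achieving pair); objective: alternative decomposition, same asymptotic cost.

-- ===== PORT A =====
-- state: some (min_distance, optional (h_start, h_end, t_start, t_end)); none = an IndexError occurred
def pvA_step (he te : List Int) (i : Int) (x : Int)
    (st : Option (Int × Option (Int × Int × Int × Int))) (p : Int × Int) :
    Option (Int × Option (Int × Int × Int × Int)) :=
  match st with
  | none => none
  | some (md, q) =>
    if |x - p.2| < md then
      match PySem.List.pyGet? he i, PySem.List.pyGet? te p.1 with
      | some hend, some tend => some (|x - p.2|, some (x, hend, p.2, tend))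
      | _, _ => none
    else some (md, q)

def find_closest_distance_between_entities (head_start_location : List Int) (head_end_location : List Int) (tail_start_location : List Int) (tail_end_location : List Int) : List Int :=
  match (PySem.List.enumerate head_start_location).foldl
      (fun st q => (PySem.List.enumerate tail_start_location).foldl
        (pvA_step head_end_location tail_end_location q.1 q.2) st)
      (some ((99999 : Int), (none : Option (Int × Int × Int × Int)))) with
  | some (_, some (a, b, c, d)) => [a, b, c, d]
  | _ => []   -- Python raises here (UnboundLocalError or IndexError); excluded by Pre_

-- ===== PORT B =====
def find_closest_distance_between_entities_alt (head_start_location : List Int) (head_end_location : List Int) (tail_start_location : List Int) (tail_end_location : List Int) : List Int :=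
  match PySem.List.min? (head_start_location.flatMap
      (fun x => tail_start_location.map (fun y => |x - y|))) (fun d => d) with
  | none => []   -- min() of an empty sequence raises ValueError; excluded by Pre_
  | some best =>
    match (PySem.List.enumerate head_start_location).find?
        (fun q => tail_start_location.any (fun y => |q.2 - y| == best)) with
    | none => []   -- next() raises StopIteration; unreachable once best exists
    | some (i, x) =>
      match (PySem.List.enumerate tail_start_location).find? (fun p => |x - p.2| == best) with
      | none => []
      | some (j, y) =>
        match PySem.List.pyGet? head_end_location i, PySem.List.pyGet? tail_end_location j with
        | some hend, some tend => [x, hend, y, tend]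
        | _, _ => []   -- IndexError; excluded by Pre_

-- ===== PRECONDITION & SPEC =====
-- Pre_ excludes inputs where A raises: empty start lists or no pair closer than the 99999 sentinel
-- (UnboundLocalError), and end lists shorter than their start lists, on which A's raising or returning
-- depends on which candidate pairs happen to improve during the scan (IndexError on some, not all).
def Pre_find_closest_distance_between_entities (head_start_location : List Int) (head_end_location : List Int) (tail_start_location : List Int) (tail_end_location : List Int) : Prop :=
  head_start_location ≠ [] ∧ tail_start_location ≠ [] ∧
  head_start_location.length ≤ head_end_location.length ∧
  tail_start_location.length ≤ tail_end_location.length ∧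
  ∃ x ∈ head_start_location, ∃ y ∈ tail_start_location, |x - y| < 99999
instance (head_start_location : List Int) (head_end_location : List Int) (tail_start_location : List Int) (tail_end_location : List Int) : Decidable (Pre_find_closest_distance_between_entities head_start_location head_end_location tail_start_location tail_end_location) := by unfold Pre_find_closest_distance_between_entities; infer_instance
def pvWitness_find_closest_distance_between_entities : List Int × List Int × List Int × List Int := ([0], [1], [0], [2])

def Spec_find_closest_distance_between_entities (head_start_location : List Int) (head_end_location : List Int) (tail_start_location : List Int) (tail_end_location : List Int) (out : List Int) : Prop := out = find_closest_distance_between_entities_alt head_start_location head_end_location tail_start_location tail_end_location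
instance (head_start_location : List Int) (head_end_location : List Int) (tail_start_location : List Int) (tail_end_location : List Int) (out : List Int) : Decidable (Spec_find_closest_distance_between_entities head_start_location head_end_location tail_start_location tail_end_location out) := by unfold Spec_find_closest_distance_between_entities; infer_instance

-- ===== CLAIM (what is proved, stated in full; the proofs are below) =====
def Claim_equal_find_closest_distance_between_entities : Prop := ∀ (head_start_location : List Int) (head_end_location : List Int) (tail_start_location : List Int) (tail_end_location : List Int), Dom_find_closest_distance_between_entities head_start_location head_end_location tail_start_location tail_end_location → Pre_find_closest_distance_between_entities head_start_location head_end_location tail_start_location tail_end_location → Spec_find_closest_distance_between_entities head_start_location head_end_location tail_start_location tail_end_location (find_closest_distance_between_entities head_start_location head_end_location tail_start_location tail_end_location)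

-- ===== LEMMAS AND PROOFS =====

-- a candidate pair: (i, x, j, y)
def pvD (c : Int × Int × Int × Int) : Int := |c.2.1 - c.2.2.2|

def pvAll (hs ts : List Int) : List (Int × Int × Int × Int) :=
  (PySem.List.enumerate hs).flatMap
    (fun q => (PySem.List.enumerate ts).map (fun p => (q.1, q.2, p.1, p.2)))

def pvValid (he te : List Int) (c : Int × Int × Int × Int) : Prop :=
  0 ≤ c.1 ∧ c.1 < he.length ∧ 0 ≤ c.2.2.1 ∧ c.2.2.1 < te.length

def pvRender (he te : List Int) (c : Int × Int × Int × Int) : Int × Int × Int × Int :=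
  (c.2.1, he.getD c.1.toNat 0, c.2.2.2, te.getD c.2.2.1.toNat 0)

-- A's best-so-far recursion, abstracted over the candidate list
def pvBest (m : Int) (q : Option (Int × Int × Int × Int)) :
    List (Int × Int × Int × Int) → Int × Option (Int × Int × Int × Int)
  | [] => (m, q)
  | c :: cs => if pvD c < m then pvBest (pvD c) (some c) cs else pvBest m q cs

theorem pvBest_stay (cs : List (Int × Int × Int × Int)) (m : Int) (q : Option (Int × Int × Int × Int))
    (h : ∀ c ∈ cs, ¬ pvD c < m) : pvBest m q cs = (m, q) := by
  induction cs with
  | nil => rfl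
  | cons c cs ih =>
    simp only [pvBest]
    rw [if_neg (h c (by simp))]
    exact ih (fun c' hc' => h c' (by simp [hc']))

theorem pvBest_spec (cs : List (Int × Int × Int × Int)) (m : Int)
    (q : Option (Int × Int × Int × Int)) (b : Int)
    (hmem : b ∈ cs.map pvD) (hle : ∀ d ∈ cs.map pvD, b ≤ d) (hlt : b < m) :
    (pvBest m q cs).2 = cs.find? (fun c => pvD c == b) := by
  induction cs generalizing m q with
  | nil => simp at hmem
  | cons c cs ih =>
    by_cases hc : pvD c = b
    · have h1 : pvBest m q (c :: cs) = pvBest b (some c) cs := by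
        simp only [pvBest]; rw [hc, if_pos hlt]
      have h2 : ∀ c' ∈ cs, ¬ pvD c' < b := fun c' hc' =>
        not_lt.2 (hle _ (List.mem_map.2 ⟨c', List.mem_cons_of_mem _ hc', rfl⟩))
      rw [h1, pvBest_stay cs b (some c) h2, List.find?_cons_of_pos (by simp [hc])]
    · have hb : b ∈ cs.map pvD := by
        rcases List.mem_map.1 hmem with ⟨c', hc', heq⟩
        rcases List.mem_cons.1 hc' with h | h
        · exact absurd (h ▸ heq) hc
        · exact List.mem_map.2 ⟨c', h, heq⟩
      have hblt : b < pvD c := lt_of_le_of_ne (hle _ (by simp)) (fun h => hc h.symm)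
      rw [List.find?_cons_of_neg (by simp [hc])]
      simp only [pvBest]
      by_cases hcm : pvD c < m
      · rw [if_pos hcm]
        exact ih (pvD c) (some c) hb (fun d hd => hle d (by simp [hd])) hblt
      · rw [if_neg hcm]
        exact ih m q hb (fun d hd => hle d (by simp [hd])) hlt

-- flattening A's nested loop over the candidate list
theorem pvFoldl_flatMap {α β γ : Type} (l : List α) (f : α → List β) (g : γ → β → γ) (init : γ) :
    (l.flatMap f).foldl g init = l.foldl (fun st a => (f a).foldl g st) init := by
  induction l generalizing init with
  | nil => rfl
  | cons a l ih => simp [List.flatMap_cons, List.foldl_append, ih]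

theorem pvGet_valid (l : List Int) (i : Int) (h0 : 0 ≤ i) (h1 : i < l.length) :
    PySem.List.pyGet? l i = some (l.getD i.toNat 0) := by
  rw [PySem.List.pyGet?_of_nonneg l h0, List.getD_eq_getElem?_getD]
  have h2 : i.toNat < l.length := by omega
  simp [List.getElem?_eq_getElem h2]

-- A's fold, on a list of valid candidates, computes pvBest (rendered)
theorem pvA_run (he te : List Int) (cs : List (Int × Int × Int × Int)) (m : Int)
    (q : Option (Int × Int × Int × Int)) (hv : ∀ c ∈ cs, pvValid he te c) :
    cs.foldl (fun st c => pvA_step he te c.1 c.2.1 st (c.2.2.1, c.2.2.2))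
        (some (m, q.map (pvRender he te)))
      = some ((pvBest m q cs).1, (pvBest m q cs).2.map (pvRender he te)) := by
  induction cs generalizing m q with
  | nil => rfl
  | cons c cs ih =>
    have hvc := hv c (by simp)
    have h1 := pvGet_valid he c.1 hvc.1 hvc.2.1
    have h2 := pvGet_valid te c.2.2.1 hvc.2.2.1 hvc.2.2.2
    simp only [List.foldl_cons, pvBest]
    by_cases hlt : pvD c < m
    · have : pvA_step he te c.1 c.2.1 (some (m, q.map (pvRender he te))) (c.2.2.1, c.2.2.2)
          = some (pvD c, some (pvRender he te c)) := by
        simp only [pvA_step, pvD] at *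
        rw [if_pos hlt, h1, h2]
        rfl
      rw [this, if_pos hlt]
      have := ih (pvD c) (some c) (fun c' hc' => hv c' (by simp [hc']))
      simpa [pvRender] using this
    · have : pvA_step he te c.1 c.2.1 (some (m, q.map (pvRender he te))) (c.2.2.1, c.2.2.2)
          = some (m, q.map (pvRender he te)) := by
        simp only [pvA_step, pvD] at *
        rw [if_neg hlt]
      rw [this, if_neg hlt]
      exact ih m q (fun c' hc' => hv c' (by simp [hc']))

-- B's two-stage search equals a single find? over the flattened candidate list
theorem pvB_search (ts : List Int) (best : Int) (L : List (Int × Int)) :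
    (L.flatMap (fun q => (PySem.List.enumerate ts).map (fun p => (q.1, q.2, p.1, p.2)))).find?
        (fun c => pvD c == best)
      = match L.find? (fun q => ts.any (fun y => |q.2 - y| == best)) with
        | none => none
        | some (i, x) =>
            ((PySem.List.enumerate ts).find? (fun p => |x - p.2| == best)).map
              (fun p => (i, x, p.1, p.2)) := by
  induction L with
  | nil => rfl
  | cons q L ih =>
    have hblock : ((PySem.List.enumerate ts).map
          (fun p : Int × Int => (q.1, q.2, p.1, p.2))).find? (fun c => pvD c == best)
        = ((PySem.List.enumerate ts).find? (fun p => |q.2 - p.2| == best)).map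
            (fun p : Int × Int => (q.1, q.2, p.1, p.2)) := by
      rw [List.find?_map]; rfl
    have hany : (ts.any (fun y => |q.2 - y| == best))
        = ((PySem.List.enumerate ts).find? (fun p => |q.2 - p.2| == best)).isSome := by
      rcases h : (PySem.List.enumerate ts).find? (fun p => |q.2 - p.2| == best) with _ | p
      · rw [h, Option.isSome_none]
        rw [List.find?_eq_none] at h
        simp only [List.any_eq_false]
        intro y hy
        rcases List.mem_iff_getElem.1 hy with ⟨k, hk, rfl⟩
        have hm : ((0 : Int) + k, ts[k]) ∈ PySem.List.enumerate ts 0 :=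
          (PySem.List.mem_enumerate_iff ts 0 _).2 ⟨k, hk, rfl⟩
        simpa using h _ hm
      · have hp := List.find?_some h
        have hmem := List.mem_of_find?_eq_some h
        have hts : p.2 ∈ ts := by
          have h2 := PySem.List.map_snd_enumerate ts 0
          rw [← h2]
          exact List.mem_map.2 ⟨p, hmem, rfl⟩
        rw [h, Option.isSome_some]
        simp only [List.any_eq_true]
        exact ⟨p.2, hts, hp⟩
    rcases hf : (PySem.List.enumerate ts).find? (fun p => |q.2 - p.2| == best) with _ | p
    · rw [List.flatMap_cons, List.find?_append, hblock, hf,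
        List.find?_cons_of_neg (by rw [hany, hf]; simp)]
      simpa using ih
    · rw [List.flatMap_cons, List.find?_append, hblock, hf,
        List.find?_cons_of_pos (by rw [hany, hf]; rfl)]
      simp [hf]

-- every candidate is valid given the length hypotheses
theorem pvAll_valid (hs he ts te : List Int) (hle1 : hs.length ≤ he.length)
    (hle2 : ts.length ≤ te.length) : ∀ c ∈ pvAll hs ts, pvValid he te c := by
  intro c hc
  rcases List.mem_flatMap.1 hc with ⟨q, hq, hc⟩
  rcases List.mem_map.1 hc with ⟨p, hp, rfl⟩
  rcases (PySem.List.mem_enumerate_iff hs 0 q).1 hq with ⟨k, hk, rfl⟩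
  rcases (PySem.List.mem_enumerate_iff ts 0 p).1 hp with ⟨k', hk', rfl⟩
  simp only [pvValid]
  refine ⟨?_, ?_, ?_, ?_⟩ <;> omega

-- the distances B minimises over are the pvD values of the candidates
theorem pvDists_eq (hs ts : List Int) :
    hs.flatMap (fun x => ts.map (fun y => |x - y|)) = (pvAll hs ts).map pvD := by
  unfold pvAll
  rw [List.map_flatMap]
  conv_lhs => rw [← PySem.List.map_snd_enumerate hs 0, List.flatMap_map]
  refine List.flatMap_congr (fun q _ => ?_)
  rw [List.map_map]
  conv_lhs => rw [← PySem.List.map_snd_enumerate ts 0, List.map_map]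
  rfl

-- ===== VERDICT (by name: the statement is the Claim_ definition above) =====
theorem find_closest_distance_between_entities_spec : Claim_equal_find_closest_distance_between_entities := by
  intro hs he ts te _hdom hpre
  obtain ⟨hne1, hne2, hle1, hle2, x0, hx0, y0, hy0, hxy⟩ := hpre
  unfold Spec_find_closest_distance_between_entities
  unfold find_closest_distance_between_entities find_closest_distance_between_entities_alt
  -- the minimum distance exists
  have hdne : hs.flatMap (fun x => ts.map (fun y => |x - y|)) ≠ [] := by
    intro h
    have : |x0 - y0| ∈ hs.flatMap (fun x => ts.map (fun y => |x - y|)) :=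
      List.mem_flatMap.2 ⟨x0, hx0, List.mem_map.2 ⟨y0, hy0, rfl⟩⟩
    simp [h] at this
  rcases hmin : PySem.List.min? (hs.flatMap (fun x => ts.map (fun y => |x - y|))) (fun d => d)
      with _ | b
  · exact absurd ((PySem.List.min?_eq_none_iff _ _).1 hmin) hdne
  have hbmem : b ∈ (pvAll hs ts).map pvD := by
    rw [← pvDists_eq]; exact PySem.List.min?_mem hmin
  have hble : ∀ d ∈ (pvAll hs ts).map pvD, b ≤ d := by
    rw [← pvDists_eq]; exact fun d hd => PySem.List.min?_isMin hmin d hd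
  have hblt : b < 99999 := by
    have : |x0 - y0| ∈ (pvAll hs ts).map pvD := by
      rw [← pvDists_eq]
      exact List.mem_flatMap.2 ⟨x0, hx0, List.mem_map.2 ⟨y0, hy0, rfl⟩⟩
    exact lt_of_le_of_lt (hble _ this) hxy
  -- A's side: nested fold = pvBest over pvAll, rendered
  have hA : (PySem.List.enumerate hs).foldl
      (fun st q => (PySem.List.enumerate ts).foldl (pvA_step he te q.1 q.2) st)
      (some ((99999 : Int), (none : Option (Int × Int × Int × Int))))
      = some ((pvBest 99999 none (pvAll hs ts)).1,
              (pvBest 99999 none (pvAll hs ts)).2.map (pvRender he te)) := by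
    have h1 : ∀ (st : Option (Int × Option (Int × Int × Int × Int))) (q : Int × Int),
        (PySem.List.enumerate ts).foldl (pvA_step he te q.1 q.2) st
        = ((PySem.List.enumerate ts).map (fun p => (q.1, q.2, p.1, p.2))).foldl
            (fun st c => pvA_step he te c.1 c.2.1 st (c.2.2.1, c.2.2.2)) st := by
      intro st q
      rw [List.foldl_map]
    have h2 : (PySem.List.enumerate hs).foldl
        (fun st q => (PySem.List.enumerate ts).foldl (pvA_step he te q.1 q.2) st)
        (some ((99999 : Int), (none : Option (Int × Int × Int × Int))))
        = (pvAll hs ts).foldl (fun st c => pvA_step he te c.1 c.2.1 st (c.2.2.1, c.2.2.2))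
            (some ((99999 : Int), (none : Option (Int × Int × Int × Int)))) := by
      unfold pvAll
      rw [pvFoldl_flatMap]
      congr 1
      funext st q
      exact h1 st q
    rw [h2]
    have := pvA_run he te (pvAll hs ts) 99999 none (pvAll_valid hs he ts te hle1 hle2)
    simpa using this
  rw [hA]
  -- both sides now reduce to the first candidate with pvD = b
  have hbest := pvBest_spec (pvAll hs ts) 99999 none b hbmem hble hblt
  have hsearch := pvB_search ts b (PySem.List.enumerate hs)
  have hfind : ∃ c, (pvAll hs ts).find? (fun c => pvD c == b) = some c := by
    rcases List.mem_map.1 hbmem with ⟨c0, hc0, hbc0⟩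
    have hs1 : ((pvAll hs ts).find? (fun c => pvD c == b)).isSome = true :=
      List.find?_isSome.2 ⟨c0, hc0, by simp [hbc0]⟩
    exact Option.isSome_iff_exists.1 hs1
  rcases hfind with ⟨c, hc⟩
  have hcmem := List.mem_of_find?_eq_some hc
  have hcval : pvValid he te c := pvAll_valid hs he ts te hle1 hle2 c hcmem
  have hg1 := pvGet_valid he c.1 hcval.1 hcval.2.1
  have hg2 := pvGet_valid te c.2.2.1 hcval.2.2.1 hcval.2.2.2
  rw [hbest, hc]
  unfold pvAll at hc
  rw [hc] at hsearch
  rcases hf1 : (PySem.List.enumerate hs).find?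
      (fun q => ts.any (fun y => |q.2 - y| == b)) with _ | q
  · rw [hf1] at hsearch; simp at hsearch
  obtain ⟨qi, qx⟩ := q
  rw [hf1] at hsearch
  dsimp only at hsearch
  rcases hf2 : (PySem.List.enumerate ts).find? (fun p => |qx - p.2| == b) with _ | p
  · rw [hf2] at hsearch; simp at hsearch
  rw [hf2] at hsearch
  simp only [Option.map_some] at hsearch
  have hceq : c = (qi, qx, p.1, p.2) := by simpa using hsearch
  subst hceq
  dsimp only at hg1 hg2
  simp [pvRender, hf1, hf2, hg1, hg2]
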